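-- pv_equiv track=rewrite | github.com/EncryptMan/definance | definance/symbols.py | find_pair_with_base_coin
-- ===== SOURCE A (Python) =====
-- def find_pair_with_base_coin(base_coin: str, pairs: list[str]) -> str | None:
--     # First priotize the USDT pair
--     found_symbol = search_symbol(f'{base_coin}/USDT', pairs)
--
--     if found_symbol:
--         return found_symbol
--
--     # If not found, then try to find the BTC pair
--     found_symbol = search_symbol(f'{base_coin}/BTC', pairs)
--
--     if found_symbol:
--         return found_symbol
--
--     # If not found, then try to find the ETH pair
--     found_symbol = search_symbol(f'{base_coin}/ETH', pairs)
--
--     if found_symbol: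
--         return found_symbol
--
--     # If not found, then find any pair
--     for symbol in pairs:
--         if symbol.split('/')[0] == base_coin:
--             return symbol
--
--     return None
--
-- def search_symbol(search_symbol: str, symbols: list[str]) -> str | None:
--     '''
--     Search for a symbol in a list of symbols and return the symbol if found, otherwise return None.
--     This function will ignore spaces, dashes, underscores and slashes in the search_symbol.
--     '''
--
--     search_symbol = search_symbol.upper().replace(' ', '').replace('-', '').replace('_', '').replace('/', '')
--     for symbol in symbols:
--         if search_symbol == symbol.replace('/', '').replace('-', '').replace('_', '').replace(' ', '').upper():
--             return symbol
--
--     return None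
-- ===== SOURCE B (Python) =====
-- def find_pair_with_base_coin(base_coin: str, pairs: list[str]) -> str | None:
--     # Different strategy: instead of staged searches per target, score each symbol
--     # once with a priority rank (0=USDT pair, 1=BTC pair, 2=ETH pair, 3=same base,
--     # 4=no match) and keep the earliest symbol with the best rank in a single
--     # best-candidate pass (early exit on a perfect rank-0 hit).
--     def norm_target(s):
--         return s.upper().replace(' ', '').replace('-', '').replace('_', '').replace('/', '')
--
--     t_usdt = norm_target(f'{base_coin}/USDT')
--     t_btc = norm_target(f'{base_coin}/BTC')
--     t_eth = norm_target(f'{base_coin}/ETH')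
--
--     def rank(symbol):
--         key = symbol.replace('/', '').replace('-', '').replace('_', '').replace(' ', '').upper()
--         if key == t_usdt:
--             return 0
--         if key == t_btc:
--             return 1
--         if key == t_eth:
--             return 2
--         return 3 if symbol.split('/')[0] == base_coin else 4
--
--     best_rank, best = 4, None
--     for symbol in pairs:
--         r = rank(symbol)
--         if r < best_rank:
--             best_rank, best = r, symbol
--             if r == 0:
--                 break
--     return best
-- ===== Notes on version B (the rewrite author's own statement) =====
-- stated objective: alternative
-- what changed: Replaces A's staged target-centric searches (three search_symbol scans then a fallback scan) with a symbol-centric best-candidate selection: each symbol is scored once with a priority rank (0..4) and a single pass keeps the earliest symbol with the minimum rank, exiting early on a rank-0 hit.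
import Mathlib
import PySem

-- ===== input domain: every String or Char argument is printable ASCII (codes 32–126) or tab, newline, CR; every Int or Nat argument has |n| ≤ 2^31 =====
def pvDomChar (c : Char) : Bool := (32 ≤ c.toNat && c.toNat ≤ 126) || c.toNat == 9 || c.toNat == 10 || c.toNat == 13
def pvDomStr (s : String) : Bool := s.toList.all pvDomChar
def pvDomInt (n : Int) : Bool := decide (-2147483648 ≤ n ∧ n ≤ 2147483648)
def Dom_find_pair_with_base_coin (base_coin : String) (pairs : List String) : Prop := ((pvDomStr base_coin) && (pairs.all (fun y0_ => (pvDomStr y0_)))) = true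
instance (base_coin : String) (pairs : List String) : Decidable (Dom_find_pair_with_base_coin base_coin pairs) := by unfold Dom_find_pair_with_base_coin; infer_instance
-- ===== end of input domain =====

-- B replaces A's staged target-centric searches with a symbol-centric best-candidate pass:
-- each symbol is scored once with a priority rank and the earliest minimum-rank symbol wins.

-- shared helpers (the identical subexpressions of both Pythons)
-- symbol-side normalization: strip '/', '-', '_', ' ', then upper (A's loop body, B's rank key)
def pvNormSym (s : String) : String :=
  PySem.Str.upper (PySem.Str.replace (PySem.Str.replace (PySem.Str.replace (PySem.Str.replace s "/" "") "-" "") "_" "") " " "")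

-- target-side normalization: upper, then strip ' ', '-', '_', '/' (A's search key, B's norm_target)
def pvNormTarget (s : String) : String :=
  PySem.Str.replace (PySem.Str.replace (PySem.Str.replace (PySem.Str.replace (PySem.Str.upper s) " " "") "-" "") "_" "") "/" ""

-- symbol.split('/')[0] == base_coin  (split('/') is never empty, so [0] is the head)
def pvBaseMatch (base_coin sym : String) : Bool :=
  ((PySem.Str.split? sym "/").getD []).headD "" == base_coin

-- ===== PORT A =====
def search_symbol (search : String) (symbols : List String) : Option String :=
  let q := pvNormTarget search
  symbols.find? (fun sym => q == pvNormSym sym)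

def find_pair_with_base_coin (base_coin : String) (pairs : List String) : Option String :=
  match search_symbol (base_coin ++ "/USDT") pairs with
  | some s => some s
  | none =>
    match search_symbol (base_coin ++ "/BTC") pairs with
    | some s => some s
    | none =>
      match search_symbol (base_coin ++ "/ETH") pairs with
      | some s => some s
      | none => pairs.find? (fun sym => pvBaseMatch base_coin sym)

-- ===== PORT B =====
-- B's rank(symbol): 0 USDT pair, 1 BTC pair, 2 ETH pair, 3 same base, 4 no match
def pvRank (base_coin t_usdt t_btc t_eth sym : String) : Nat :=
  let key := pvNormSym sym
  if key == t_usdt then 0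
  else if key == t_btc then 1
  else if key == t_eth then 2
  else if pvBaseMatch base_coin sym then 3 else 4

-- B's for-loop with its early break on a rank-0 hit
def pvLoop (rank : String → Nat) : List String → Nat → Option String → Option String
  | [], _, best => best
  | sym :: rest, best_rank, best =>
    let r := rank sym
    if r < best_rank then
      if r = 0 then some sym else pvLoop rank rest r (some sym)
    else pvLoop rank rest best_rank best

def find_pair_with_base_coin_alt (base_coin : String) (pairs : List String) : Option String :=
  let t_usdt := pvNormTarget (base_coin ++ "/USDT")
  let t_btc := pvNormTarget (base_coin ++ "/BTC")
  let t_eth := pvNormTarget (base_coin ++ "/ETH")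
  pvLoop (pvRank base_coin t_usdt t_btc t_eth) pairs 4 none

-- ===== PRECONDITION & SPEC =====
def Spec_find_pair_with_base_coin (base_coin : String) (pairs : List String) (out : Option String) : Prop := out = find_pair_with_base_coin_alt base_coin pairs
instance (base_coin : String) (pairs : List String) (out : Option String) : Decidable (Spec_find_pair_with_base_coin base_coin pairs out) := by unfold Spec_find_pair_with_base_coin; infer_instance

-- ===== CLAIM (what is proved, stated in full; the proofs are below) =====
def Claim_equal_find_pair_with_base_coin : Prop := ∀ (base_coin : String) (pairs : List String), Dom_find_pair_with_base_coin base_coin pairs → Spec_find_pair_with_base_coin base_coin pairs (find_pair_with_base_coin base_coin pairs)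

-- ===== LEMMAS AND PROOFS =====

-- first n priority levels, as a chain of find?s (proof-side characterisation of B's loop)
def pvG (rank : String → Nat) (l : List String) : Nat → Option String
  | 0 => none
  | n + 1 => (pvG rank l n).or (l.find? (fun s => rank s == n))

theorem pvG_nil (rank : String → Nat) (n : Nat) : pvG rank [] n = none := by
  induction n with
  | zero => rfl
  | succ n ih => simp [pvG, ih]

theorem pvG_cons_le (rank : String → Nat) (sym : String) (rest : List String)
    (n : Nat) (h : n ≤ rank sym) : pvG rank (sym :: rest) n = pvG rank rest n := by
  induction n with
  | zero => rfl
  | succ n ih =>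
    have h1 : (rank sym == n) = false := by
      simp only [beq_eq_false_iff_ne]; omega
    simp [pvG, ih (by omega), h1]

theorem pvG_cons_lt (rank : String → Nat) (sym : String) (rest : List String)
    (br : Nat) (h : rank sym < br) :
    pvG rank (sym :: rest) br = (pvG rank rest (rank sym)).or (some sym) := by
  induction br with
  | zero => omega
  | succ m ih =>
    by_cases hm : rank sym = m
    · have h1 : (rank sym == m) = true := by simp [hm]
      simp [pvG, pvG_cons_le rank sym rest m (by omega), hm]
    · have hlt : rank sym < m := by omega
      rw [pvG, ih hlt, Option.or_assoc]
      cases pvG rank rest (rank sym) <;> simp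

theorem pvLoop_eq_pvG (rank : String → Nat) (l : List String) (br : Nat)
    (best : Option String) (hbr : 1 ≤ br) :
    pvLoop rank l br best = (pvG rank l br).or best := by
  induction l generalizing br best with
  | nil => simp [pvLoop, pvG_nil]
  | cons sym rest ih =>
    by_cases hlt : rank sym < br
    · by_cases h0 : rank sym = 0
      · have : pvG rank (sym :: rest) br = (pvG rank rest 0).or (some sym) := by
          rw [← h0] at *; exact pvG_cons_lt rank sym rest br hlt
        simp [pvLoop, h0, this, pvG]
        exact fun h => absurd h (by omega)
      · rw [pvLoop]
        simp only [hlt, if_true, h0, if_false]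
        rw [ih (rank sym) (some sym) (by omega),
            pvG_cons_lt rank sym rest br hlt, Option.or_assoc]
        cases pvG rank rest (rank sym) <;> simp
    · rw [pvLoop]
      simp only [hlt, if_false]
      rw [ih br best hbr, pvG_cons_le rank sym rest br (by omega)]

-- find? respects pointwise-equal predicates on the list's members
theorem pvFind?_congr {α : Type} (l : List α) (p q : α → Bool)
    (h : ∀ x ∈ l, p x = q x) : l.find? p = l.find? q := by
  induction l with
  | nil => rfl
  | cons a rest ih =>
    simp only [List.find?_cons, h a (by simp)]
    cases hq : q a with
    | true => rfl
    | false => exact ih (fun x hx => h x (by simp [hx]))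

-- ===== VERDICT (by name: the statement is the Claim_ definition above) =====
theorem find_pair_with_base_coin_spec : Claim_equal_find_pair_with_base_coin := by
  intro base_coin pairs _
  unfold Spec_find_pair_with_base_coin find_pair_with_base_coin find_pair_with_base_coin_alt search_symbol
  set t0 := pvNormTarget (base_coin ++ "/USDT") with ht0
  set t1 := pvNormTarget (base_coin ++ "/BTC") with ht1
  set t2 := pvNormTarget (base_coin ++ "/ETH") with ht2
  set rk := pvRank base_coin t0 t1 t2 with hrk
  rw [pvLoop_eq_pvG rk pairs 4 none (by omega)]
  have hG : pvG rk pairs 4 =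
      (((pairs.find? (fun s => rk s == 0)).or (pairs.find? (fun s => rk s == 1))).or
        (pairs.find? (fun s => rk s == 2))).or (pairs.find? (fun s => rk s == 3)) := by
    simp [pvG]
  -- level 0 always coincides with the USDT search
  have e0 : pairs.find? (fun s => rk s == 0) = pairs.find? (fun sym => t0 == pvNormSym sym) := by
    apply pvFind?_congr
    intro s _
    by_cases h : pvNormSym s = t0
    · simp [hrk, pvRank, h]
    · have h' : (pvNormSym s == t0) = false := by simp [h]
      have h'' : (t0 == pvNormSym s) = false := by rw [beq_eq_false_iff_ne]; exact fun e => h (Eq.symm e)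
      simp only [hrk, pvRank, h', Bool.false_eq_true, if_false, h'']
      split_ifs <;> simp
  cases hF0 : pairs.find? (fun sym => t0 == pvNormSym sym) with
  | some s => simp [hG, e0, hF0]
  | none =>
    have hn0 : ∀ s ∈ pairs, ¬ (pvNormSym s = t0) := by
      intro s hs he
      have := List.find?_eq_none.mp hF0 s hs
      simp [he] at this
    have e1 : pairs.find? (fun s => rk s == 1) = pairs.find? (fun sym => t1 == pvNormSym sym) := by
      apply pvFind?_congr
      intro s hs
      have h0' : (pvNormSym s == t0) = false := by simp [hn0 s hs]
      by_cases h : pvNormSym s = t1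
      · have hne : ¬ t1 = t0 := by intro e; rw [h, e] at h0'; simp at h0'
        simp [hrk, pvRank, h, hne]
      · have h' : (pvNormSym s == t1) = false := by simp [h]
        have h'' : (t1 == pvNormSym s) = false := by rw [beq_eq_false_iff_ne]; exact fun e => h (Eq.symm e)
        simp only [hrk, pvRank, h0', h', Bool.false_eq_true, if_false, h'']
        split_ifs <;> simp
    cases hF1 : pairs.find? (fun sym => t1 == pvNormSym sym) with
    | some s => simp [hG, e0, e1, hF0, hF1]
    | none =>
      have hn1 : ∀ s ∈ pairs, ¬ (pvNormSym s = t1) := by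
        intro s hs he
        have := List.find?_eq_none.mp hF1 s hs
        simp [he] at this
      have e2 : pairs.find? (fun s => rk s == 2) = pairs.find? (fun sym => t2 == pvNormSym sym) := by
        apply pvFind?_congr
        intro s hs
        have h0' : (pvNormSym s == t0) = false := by simp [hn0 s hs]
        have h1' : (pvNormSym s == t1) = false := by simp [hn1 s hs]
        by_cases h : pvNormSym s = t2
        · have hne0 : ¬ t2 = t0 := by intro e; rw [h, e] at h0'; simp at h0'
          have hne1 : ¬ t2 = t1 := by intro e; rw [h, e] at h1'; simp at h1'
          simp [hrk, pvRank, h, hne0, hne1]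
        · have h' : (pvNormSym s == t2) = false := by simp [h]
          have h'' : (t2 == pvNormSym s) = false := by rw [beq_eq_false_iff_ne]; exact fun e => h (Eq.symm e)
          simp only [hrk, pvRank, h0', h1', h', Bool.false_eq_true, if_false, h'']
          split_ifs <;> simp
      cases hF2 : pairs.find? (fun sym => t2 == pvNormSym sym) with
      | some s => simp [hG, e0, e1, e2, hF0, hF1, hF2]
      | none =>
        have hn2 : ∀ s ∈ pairs, ¬ (pvNormSym s = t2) := by
          intro s hs he
          have := List.find?_eq_none.mp hF2 s hs
          simp [he] at this
        have e3 : pairs.find? (fun s => rk s == 3) = pairs.find? (fun sym => pvBaseMatch base_coin sym) := by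
          apply pvFind?_congr
          intro s hs
          have h0' : (pvNormSym s == t0) = false := by simp [hn0 s hs]
          have h1' : (pvNormSym s == t1) = false := by simp [hn1 s hs]
          have h2' : (pvNormSym s == t2) = false := by simp [hn2 s hs]
          by_cases h : pvBaseMatch base_coin s = true <;>
            simp [hrk, pvRank, h0', h1', h2', h]
        simp [hG, e0, e1, e2, e3, hF0, hF1, hF2]
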